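-- pv_equiv track=rewrite | github.com/loponly/ai-video-gen | tools/script/optimize_script_for_platform.py | _make_educational_language
-- ===== SOURCE A (Python) =====
-- def _make_educational_language(script: str, level: str) -> str:
--     """Make language more educational and YouTube-appropriate."""
--
--     educational_phrases = {
--         "Here's": "Let me explain",
--         "This is": "What you need to know is",
--         "So": "Now here's the important part:",
--         "But": "However, here's what's interesting:"
--     }
--
--     optimized = script
--     if level in ["medium", "high", "maximum"]:
--         for old, new in educational_phrases.items():
--             optimized = optimized.replace(old, new)
--
--     return optimized
-- ===== SOURCE B (Python) =====
-- def _make_educational_language(script: str, level: str) -> str: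
--     """Make language more educational and YouTube-appropriate (single left-to-right pass)."""
--     if level not in ("medium", "high", "maximum"):
--         return script
--     phrases = [
--         ("Here's", "Let me explain"),
--         ("This is", "What you need to know is"),
--         ("So", "Now here's the important part:"),
--         ("But", "However, here's what's interesting:"),
--     ]
--     out = []
--     i = 0
--     n = len(script)
--     while i < n:
--         for old, new in phrases:
--             if script.startswith(old, i):
--                 out.append(new)
--                 i += len(old)
--                 break
--         else:
--             out.append(script[i])
--             i += 1
--     return "".join(out)
-- ===== Notes on version B (the rewrite author's own statement) =====
-- stated objective: alternative
-- what changed: B replaces the four sequential full-string str.replace passes with one left-to-right scan that matches each phrase at the current position and substitutes via a single pass; equivalent because no replacement text can create or straddle a new phrase occurrence.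
import Mathlib
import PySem

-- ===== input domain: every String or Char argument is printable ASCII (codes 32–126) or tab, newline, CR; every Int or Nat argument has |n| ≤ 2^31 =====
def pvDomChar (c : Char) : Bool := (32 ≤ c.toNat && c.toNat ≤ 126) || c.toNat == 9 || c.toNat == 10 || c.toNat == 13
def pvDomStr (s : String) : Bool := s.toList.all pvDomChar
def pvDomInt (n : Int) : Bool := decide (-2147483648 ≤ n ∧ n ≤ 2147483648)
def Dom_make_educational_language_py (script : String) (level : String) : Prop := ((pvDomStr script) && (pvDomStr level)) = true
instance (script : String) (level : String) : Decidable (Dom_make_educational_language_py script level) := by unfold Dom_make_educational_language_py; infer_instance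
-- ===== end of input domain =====

-- B does ONE left-to-right scan substituting the phrases in dict order instead of A's four
-- sequential full-string replace passes (objective: alternative single-pass algorithm).

-- ===== PORT A =====
def make_educational_language_py (script : String) (level : String) : String :=
  let educational_phrases : List (String × String) :=
    [("Here's", "Let me explain"),
     ("This is", "What you need to know is"),
     ("So", "Now here's the important part:"),
     ("But", "However, here's what's interesting:")]
  if (["medium", "high", "maximum"] : List String).contains level then
    educational_phrases.foldl (fun optimized p => PySem.Str.replace optimized p.1 p.2) script
  else script

-- ===== PORT B =====
-- single-pass scanner over the characters: at each position try the four phrases in order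
def pvGoB : List Char → List Char
  | [] => []
  | c :: t =>
    if "Here's".toList.isPrefixOf (c :: t) then "Let me explain".toList ++ pvGoB (t.drop 5)
    else if "This is".toList.isPrefixOf (c :: t) then "What you need to know is".toList ++ pvGoB (t.drop 6)
    else if "So".toList.isPrefixOf (c :: t) then "Now here's the important part:".toList ++ pvGoB (t.drop 1)
    else if "But".toList.isPrefixOf (c :: t) then "However, here's what's interesting:".toList ++ pvGoB (t.drop 2)
    else c :: pvGoB t
termination_by l => l.length
decreasing_by all_goals (simp only [List.length_drop, List.length_cons]; omega)

def make_educational_language_py_alt (script : String) (level : String) : String :=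
  if !(["medium", "high", "maximum"] : List String).contains level then script
  else String.ofList (pvGoB script.toList)

-- ===== PRECONDITION & SPEC =====
def Spec_make_educational_language_py (script : String) (level : String) (out : String) : Prop := out = make_educational_language_py_alt script level
instance (script : String) (level : String) (out : String) : Decidable (Spec_make_educational_language_py script level out) := by unfold Spec_make_educational_language_py; infer_instance

-- ===== CLAIM (what is proved, stated in full; the proofs are below) =====
def Claim_equal_make_educational_language_py : Prop := ∀ (script : String) (level : String), Dom_make_educational_language_py script level → Spec_make_educational_language_py script level (make_educational_language_py script level)

-- ===== LEMMAS AND PROOFS =====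

-- direct-recursion form of a single replace pass
def pvRep (k v : List Char) : List Char → List Char
  | [] => []
  | c :: t => if k.isPrefixOf (c :: t) then v ++ pvRep k v (t.drop (k.length - 1)) else c :: pvRep k v t
termination_by l => l.length
decreasing_by all_goals (simp only [List.length_drop, List.length_cons]; omega)

theorem pvRep_go (k v : List Char) (hk : k ≠ []) :
    ∀ fuel l acc, l.length ≤ fuel →
      PySem.Chars.replace.go k v fuel l acc = acc.reverse ++ pvRep k v l := by
  intro fuel
  induction fuel with
  | zero =>
    intro l acc hl
    have : l = [] := by cases l <;> simp_all
    subst this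
    simp [PySem.Chars.replace.go, pvRep]
  | succ n ih =>
    intro l acc hl
    cases l with
    | nil => simp [PySem.Chars.replace.go, pvRep]
    | cons c t =>
      obtain ⟨kh, kt, rfl⟩ := List.exists_cons_of_ne_nil hk
      rw [PySem.Chars.replace.go]
      by_cases hp : (kh :: kt).isPrefixOf (c :: t)
      · have hdrop : List.drop (kh :: kt).length (c :: t) = t.drop ((kh :: kt).length - 1) := by
          simp
        rw [if_pos hp, ih _ _ (by simp only [List.length_drop, List.length_cons] at hl ⊢; omega),
          hdrop, pvRep, if_pos hp]
        simp
      · rw [if_neg hp, ih _ _ (by simp only [List.length_cons] at hl; omega), pvRep, if_neg hp]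
        simp

theorem pvReplace_eq (s k v : List Char) (hk : k ≠ []) :
    PySem.Chars.replace s k v = pvRep k v s := by
  rw [PySem.Chars.replace, if_neg (by simpa using hk)]
  simpa using pvRep_go k v hk s.length s [] le_rfl

-- pass-through: if k's head char does not occur in v, a replace pass leaves the prefix v intact
theorem pvPass (k r v x : List Char) (hk : k ≠ []) (h : k.headI ∉ v) :
    pvRep k r (v ++ x) = v ++ pvRep k r x := by
  induction v with
  | nil => simp
  | cons c v' ih =>
    obtain ⟨kh, kt, rfl⟩ := List.exists_cons_of_ne_nil hk
    simp only [List.headI, List.mem_cons, not_or] at h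
    rw [List.cons_append, pvRep,
      if_neg (by rw [List.isPrefixOf_iff_prefix]; intro hpre; exact h.1 (List.cons_prefix_cons.mp hpre).1)]
    rw [ih h.2]
    simp
-- replacing at the matched phrase itself
theorem pvRep_self (kh : Char) (kt r x : List Char) :
    pvRep (kh :: kt) r ((kh :: kt) ++ x) = r ++ pvRep (kh :: kt) r x := by
  rw [List.cons_append, pvRep, if_pos (by rw [List.isPrefixOf_iff_prefix]; exact (kh :: kt).prefix_append x)]
  rw [show (kh :: kt).length - 1 = kt.length by simp, List.drop_left]

-- no-create: a replace pass whose replacement's head char does not occur in p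
-- cannot make p a prefix where it was not one
theorem pvNoCreate (k : List Char) (rh : Char) (rt : List Char) :
    ∀ (t p : List Char), rh ∉ p → p <+: pvRep k (rh :: rt) t → p <+: t := by
  intro t
  induction t using pvRep.induct (k := k) with
  | case1 => intro p _ h; simpa [pvRep] using h
  | case2 c t hp ih =>
    intro p h hpre
    rw [pvRep, if_pos hp] at hpre
    cases p with
    | nil => exact List.nil_prefix
    | cons ph pt =>
      exfalso
      have hrh : rh = ph := by
        rcases hpre with ⟨w, hw⟩
        simpa using congrArg (·.head?) hw.symm
      exact h (by rw [hrh]; exact List.mem_cons_self)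
  | case3 c t hp ih =>
    intro p h hpre
    rw [pvRep, if_neg hp] at hpre
    cases p with
    | nil => exact List.nil_prefix
    | cons ph pt =>
      rcases hpre with ⟨w, hw⟩
      obtain ⟨h1, h2⟩ := List.cons.inj hw
      subst h1
      have := ih pt (by simp only [List.mem_cons, not_or] at h; exact h.2) ⟨w, h2⟩
      exact List.cons_prefix_cons.mpr ⟨rfl, this⟩

-- the chain of A's four passes
def pvChain (s : List Char) : List Char :=
  pvRep "But".toList "However, here's what's interesting:".toList
    (pvRep "So".toList "Now here's the important part:".toList
      (pvRep "This is".toList "What you need to know is".toList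
        (pvRep "Here's".toList "Let me explain".toList s)))

theorem pvMain : ∀ s : List Char, pvChain s = pvGoB s := by
  intro s
  induction s using pvGoB.induct with
  | case1 => simp [pvChain, pvRep, pvGoB]
  | case2 c t h1 ih =>
    obtain ⟨x, hx⟩ := List.isPrefixOf_iff_prefix.mp h1
    unfold pvChain at ih ⊢
    conv_lhs => rw [← hx]
    rw [show "Here's".toList = 'H' :: "ere's".toList from by decide, pvRep_self,
      ← show "Here's".toList = 'H' :: "ere's".toList from by decide]
    rw [pvPass _ _ _ _ (by decide) (by decide), pvPass _ _ _ _ (by decide) (by decide),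
      pvPass _ _ _ _ (by decide) (by decide)]
    have hxeq : x = t.drop 5 := by
      have h6 := congrArg (List.drop 6) hx
      rw [show (6 : Nat) = ("Here's".toList).length from by decide, List.drop_left] at h6
      simpa using h6
    rw [pvGoB.eq_2, if_pos h1, hxeq, ih]
  | case3 c t h1 h2 ih =>
    obtain ⟨x, hx⟩ := List.isPrefixOf_iff_prefix.mp h2
    unfold pvChain at ih ⊢
    conv_lhs => rw [← hx]
    rw [pvPass _ _ _ _ (by decide) (by decide)]
    rw [show "This is".toList = 'T' :: "his is".toList from by decide, pvRep_self,
      ← show "This is".toList = 'T' :: "his is".toList from by decide]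
    rw [pvPass _ _ _ _ (by decide) (by decide), pvPass _ _ _ _ (by decide) (by decide)]
    have hxeq : x = t.drop 6 := by
      have h7 := congrArg (List.drop 7) hx
      rw [show (7 : Nat) = ("This is".toList).length from by decide, List.drop_left] at h7
      simpa using h7
    rw [pvGoB.eq_2, if_neg h1, if_pos h2, hxeq, ih]
  | case4 c t h1 h2 h3 ih =>
    obtain ⟨x, hx⟩ := List.isPrefixOf_iff_prefix.mp h3
    unfold pvChain at ih ⊢
    conv_lhs => rw [← hx]
    rw [pvPass _ _ _ _ (by decide) (by decide), pvPass _ _ _ _ (by decide) (by decide)]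
    rw [show "So".toList = 'S' :: "o".toList from by decide, pvRep_self,
      ← show "So".toList = 'S' :: "o".toList from by decide]
    rw [pvPass _ _ _ _ (by decide) (by decide)]
    have hxeq : x = t.drop 1 := by
      have hd := congrArg (List.drop 2) hx
      rw [show (2 : Nat) = ("So".toList).length from by decide, List.drop_left] at hd
      simpa using hd
    rw [pvGoB.eq_2, if_neg h1, if_neg h2, if_pos h3, hxeq, ih]
  | case5 c t h1 h2 h3 h4 ih =>
    obtain ⟨x, hx⟩ := List.isPrefixOf_iff_prefix.mp h4
    unfold pvChain at ih ⊢
    conv_lhs => rw [← hx]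
    rw [pvPass _ _ _ _ (by decide) (by decide), pvPass _ _ _ _ (by decide) (by decide),
      pvPass _ _ _ _ (by decide) (by decide)]
    rw [show "But".toList = 'B' :: "ut".toList from by decide, pvRep_self,
      ← show "But".toList = 'B' :: "ut".toList from by decide]
    have hxeq : x = t.drop 2 := by
      have hd := congrArg (List.drop 3) hx
      rw [show (3 : Nat) = ("But".toList).length from by decide, List.drop_left] at hd
      simpa using hd
    rw [pvGoB.eq_2, if_neg h1, if_neg h2, if_neg h3, if_pos h4,
      hxeq, ih]
  | case6 c t h1 h2 h3 h4 ih =>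
    unfold pvChain at ih ⊢
    rw [pvRep, if_neg h1]
    have hn2 : ¬ ("This is".toList.isPrefixOf (c :: pvRep "Here's".toList "Let me explain".toList t) = true) := by
      intro hp
      obtain ⟨w, hw⟩ := List.isPrefixOf_iff_prefix.mp hp
      apply h2
      rw [List.isPrefixOf_iff_prefix]
      rw [show "This is".toList = 'T' :: "his is".toList from by decide, List.cons_append] at hw
      obtain ⟨hc, hw2⟩ := List.cons.inj hw
      have hsub : "his is".toList <+: pvRep "Here's".toList ('L' :: "et me explain".toList) t := by
        simpa only [show ('L' :: "et me explain".toList) = "Let me explain".toList from by decide]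
          using (⟨w, hw2⟩ : "his is".toList <+: pvRep "Here's".toList "Let me explain".toList t)
      have s1 := pvNoCreate "Here's".toList 'L' "et me explain".toList t "his is".toList (by decide) hsub
      rw [show "This is".toList = 'T' :: "his is".toList from by decide, hc]
      exact List.cons_prefix_cons.mpr ⟨rfl, s1⟩
    rw [pvRep, if_neg hn2]
    have hn3 : ¬ ("So".toList.isPrefixOf
        (c :: pvRep "This is".toList "What you need to know is".toList
          (pvRep "Here's".toList "Let me explain".toList t)) = true) := by
      intro hp
      obtain ⟨w, hw⟩ := List.isPrefixOf_iff_prefix.mp hp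
      apply h3
      rw [List.isPrefixOf_iff_prefix]
      rw [show "So".toList = 'S' :: "o".toList from by decide, List.cons_append] at hw
      obtain ⟨hc, hw2⟩ := List.cons.inj hw
      have hsub : "o".toList <+: pvRep "This is".toList ('W' :: "hat you need to know is".toList)
          (pvRep "Here's".toList "Let me explain".toList t) := by
        simpa only [show ('W' :: "hat you need to know is".toList) = "What you need to know is".toList from by decide]
          using (⟨w, hw2⟩ : "o".toList <+: pvRep "This is".toList "What you need to know is".toList
            (pvRep "Here's".toList "Let me explain".toList t))
      have s2 := pvNoCreate "This is".toList 'W' "hat you need to know is".toList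
        (pvRep "Here's".toList "Let me explain".toList t) "o".toList (by decide) hsub
      have s1 := pvNoCreate "Here's".toList 'L' "et me explain".toList t "o".toList (by decide)
        (by simpa only [show ('L' :: "et me explain".toList) = "Let me explain".toList from by decide] using s2)
      rw [show "So".toList = 'S' :: "o".toList from by decide, hc]
      exact List.cons_prefix_cons.mpr ⟨rfl, s1⟩
    rw [pvRep, if_neg hn3]
    have hn4 : ¬ ("But".toList.isPrefixOf
        (c :: pvRep "So".toList "Now here's the important part:".toList
          (pvRep "This is".toList "What you need to know is".toList
            (pvRep "Here's".toList "Let me explain".toList t))) = true) := by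
      intro hp
      obtain ⟨w, hw⟩ := List.isPrefixOf_iff_prefix.mp hp
      apply h4
      rw [List.isPrefixOf_iff_prefix]
      rw [show "But".toList = 'B' :: "ut".toList from by decide, List.cons_append] at hw
      obtain ⟨hc, hw2⟩ := List.cons.inj hw
      have hsub : "ut".toList <+: pvRep "So".toList ('N' :: "ow here's the important part:".toList)
          (pvRep "This is".toList "What you need to know is".toList
            (pvRep "Here's".toList "Let me explain".toList t)) := by
        simpa only [show ('N' :: "ow here's the important part:".toList) = "Now here's the important part:".toList from by decide]
          using (⟨w, hw2⟩ : "ut".toList <+: pvRep "So".toList "Now here's the important part:".toList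
            (pvRep "This is".toList "What you need to know is".toList
              (pvRep "Here's".toList "Let me explain".toList t)))
      have s3 := pvNoCreate "So".toList 'N' "ow here's the important part:".toList
        (pvRep "This is".toList "What you need to know is".toList
          (pvRep "Here's".toList "Let me explain".toList t)) "ut".toList (by decide) hsub
      have s2 := pvNoCreate "This is".toList 'W' "hat you need to know is".toList
        (pvRep "Here's".toList "Let me explain".toList t) "ut".toList (by decide)
        (by simpa only [show ('W' :: "hat you need to know is".toList) = "What you need to know is".toList from by decide] using s3)
      have s1 := pvNoCreate "Here's".toList 'L' "et me explain".toList t "ut".toList (by decide)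
        (by simpa only [show ('L' :: "et me explain".toList) = "Let me explain".toList from by decide] using s2)
      rw [show "But".toList = 'B' :: "ut".toList from by decide, hc]
      exact List.cons_prefix_cons.mpr ⟨rfl, s1⟩
    rw [pvRep, if_neg hn4]
    rw [pvGoB.eq_2, if_neg h1, if_neg h2, if_neg h3, if_neg h4, ih]

-- ===== VERDICT (by name: the statement is the Claim_ definition above) =====
theorem make_educational_language_py_spec : Claim_equal_make_educational_language_py := by
  unfold Claim_equal_make_educational_language_py Spec_make_educational_language_py
  intro script level _
  unfold make_educational_language_py make_educational_language_py_alt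
  by_cases hl : (["medium", "high", "maximum"] : List String).contains level
  · rw [if_pos hl, if_neg (by simp only [hl]; decide)]
    simp only [List.foldl]
    apply String.toList_inj.mp
    simp only [PySem.Str.toList_replace, String.toList_ofList]
    rw [pvReplace_eq _ _ _ (by decide), pvReplace_eq _ _ _ (by decide),
      pvReplace_eq _ _ _ (by decide), pvReplace_eq _ _ _ (by decide)]
    exact pvMain script.toList
  · have hl' : (["medium", "high", "maximum"] : List String).contains level = false := by
      simpa using hl
    rw [if_neg hl, if_pos (by simp only [hl']; decide)]
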